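-- pv_equiv track=rewrite | github.com/fagan2888/snake | csc work/final/w14/Q7.py | count_letter_case
-- ===== SOURCE A (Python) =====
-- def count_letter_case(L):
--     # complete the function body (6 MARKS)
--     ''' (list of list of str) -> list of tuple of int
--
--     Precondition: each str in L is non-empty and contains only alphabetic
--     characters
--
--     Count the number of words in each sublist of L that start with lowercase
--     and uppercase letters. Return a new list where each element is a two-item
--     tuple in which the first item is the number of words in the list at the
--     corresponding index of L that start with a lowercase letter and the second
--     item is the number of words in the list at the corresponding index of L
--     that start with an uppercase letter.
--
--     >>> count_letter_case([['apple', 'Banana'], ['PEAR'], [], ['PEACH', 'apRICot', 'plum']])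
--     [(1, 1), (0, 1), (0, 0), (2, 1)]
--     '''
--
--     letter_cases = []
--     for i in range(len(L)):
--         sublist = L[i]
--         num_lowercase = 0
--         num_uppercase = 0
--         for j in range(len(sublist)):
--             if sublist[j][:1].isupper():
--                 num_uppercase += 1
--             else:
--                 num_lowercase += 1
--         letter_cases.append((num_lowercase, num_uppercase))
--     return letter_cases
-- ===== SOURCE B (Python) =====
-- def count_letter_case(L):
--     # Different algorithm: flatten every word to a (sublist_index, starts_upper) key,
--     # tally all keys in one dictionary pass, then rebuild the result by index lookup.
--     flags = [(i, w[:1].isupper()) for i, sub in enumerate(L) for w in sub]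
--     tally = {}
--     for key in flags:
--         tally[key] = tally.get(key, 0) + 1
--     return [(tally.get((i, False), 0), tally.get((i, True), 0)) for i in range(len(L))]
-- ===== Notes on version B (the rewrite author's own statement) =====
-- stated objective: alternative
-- what changed: B flattens all words into one stream of (sublist_index, starts_upper) keys, tallies them in a single dictionary built once, and reconstructs the result list by index lookup, instead of A's nested index loops maintaining two counters per sublist.
import Mathlib
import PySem

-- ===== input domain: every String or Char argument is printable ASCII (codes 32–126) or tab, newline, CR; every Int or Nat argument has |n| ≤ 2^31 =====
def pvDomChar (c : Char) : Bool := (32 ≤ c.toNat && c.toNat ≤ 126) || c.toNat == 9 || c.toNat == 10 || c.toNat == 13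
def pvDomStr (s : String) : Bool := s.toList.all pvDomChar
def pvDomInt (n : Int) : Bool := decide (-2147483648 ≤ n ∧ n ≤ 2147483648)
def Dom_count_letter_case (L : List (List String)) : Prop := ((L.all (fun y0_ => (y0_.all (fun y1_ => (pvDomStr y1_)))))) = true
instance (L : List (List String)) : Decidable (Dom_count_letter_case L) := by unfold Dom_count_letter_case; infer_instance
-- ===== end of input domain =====

-- B replaces A's nested two-counter index loops by a different algorithm: flatten all
-- words into one stream of (sublist_index, starts_upper) keys, tally them in a single
-- dictionary, and rebuild the result by index lookup (objective: alternative).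

-- Python's w[:1].isupper() (both Pythons use this exact expression)
def pvStartsUpper (w : String) : Bool :=
  match PySem.Chars.slice w.toList none (some 1) with
  | [] => false
  | c :: _ => PySem.Chars.isupper c

-- ===== PORT A =====
-- A's inner index loop over one sublist (the two counters, appended as one pair)
def pvCountsOf (sublist : List String) : Int × Int :=
  (PySem.List.pyRange 0 (sublist.length : Int) 1).foldl
    (fun (p : Int × Int) j =>
      if pvStartsUpper (PySem.List.pyGetD sublist j "") then (p.1, p.2 + 1)
      else (p.1 + 1, p.2))
    (0, 0)

def count_letter_case (L : List (List String)) : List (Int × Int) :=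
  (PySem.List.pyRange 0 (L.length : Int) 1).foldl
    (fun (letter_cases : List (Int × Int)) i =>
      letter_cases ++ [pvCountsOf (PySem.List.pyGetD L i [])])
    []

-- ===== PORT B =====
-- the flattened comprehension [(i, w[:1].isupper()) for i, sub in enumerate(L) for w in sub]
def pvFlags (L : List (List String)) : List (Int × Bool) :=
  (PySem.List.enumerate L 0).flatMap (fun p => p.2.map (fun w => (p.1, pvStartsUpper w)))

def count_letter_case_alt (L : List (List String)) : List (Int × Int) :=
  let tally : PySem.Dict (Int × Bool) Int :=
    (pvFlags L).foldl (fun d k => d.insert k (d.getD k 0 + 1)) PySem.Dict.empty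
  (PySem.List.pyRange 0 (L.length : Int) 1).map
    (fun i => (tally.getD (i, false) 0, tally.getD (i, true) 0))

-- ===== PRECONDITION & SPEC =====
def Spec_count_letter_case (L : List (List String)) (out : List (Int × Int)) : Prop := out = count_letter_case_alt L
instance (L : List (List String)) (out : List (Int × Int)) : Decidable (Spec_count_letter_case L out) := by unfold Spec_count_letter_case; infer_instance

-- ===== CLAIM (what is proved, stated in full; the proofs are below) =====
def Claim_equal_count_letter_case : Prop := ∀ (L : List (List String)), Dom_count_letter_case L → Spec_count_letter_case L (count_letter_case L)

-- ===== LEMMAS AND PROOFS =====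

-- A's inner two-counter loop adds the non-uppercase count to a and the uppercase count to b
lemma inner_fold_counts (sub : List String) (a b : Int) :
    sub.foldl
      (fun (p : Int × Int) w =>
        if pvStartsUpper w then (p.1, p.2 + 1) else (p.1 + 1, p.2))
      (a, b)
    = (a + (sub.countP (fun w => ! pvStartsUpper w) : Nat),
       b + (sub.countP pvStartsUpper : Nat)) := by
  induction sub generalizing a b with
  | nil => simp
  | cons w ws ih =>
    by_cases h : pvStartsUpper w = true
    · simp [List.foldl_cons, h, ih]
      ring
    · simp only [Bool.not_eq_true] at h
      simp [List.foldl_cons, h, ih]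
      ring

-- counting a key (s, b) in the flag-mapped copy of one sublist
lemma count_map_flags (x : List String) (s : Int) (b : Bool) :
    (x.map (fun w => (s, pvStartsUpper w))).count (s, b)
      = x.countP (fun w => pvStartsUpper w == b) := by
  induction x with
  | nil => simp
  | cons w ws ihw =>
    simp only [List.map_cons, List.countP_cons, List.count_cons, ihw]
    by_cases hw : pvStartsUpper w = b
    · simp [hw]
    · have h1 : ((s, pvStartsUpper w) == ((s, b) : Int × Bool)) = false := by
        rw [beq_eq_false_iff_ne]
        intro hc; exact hw (congrArg Prod.snd hc)
      simp [h1, hw]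

-- keys produced from sublists at positions ≥ s never collide with an index < s
lemma flags_count_lt (L : List (List String)) (s i : Int) (b : Bool) (h : i < s) :
    ((PySem.List.enumerate L s).flatMap
      (fun p => p.2.map (fun w => (p.1, pvStartsUpper w)))).count (i, b) = 0 := by
  induction L generalizing s with
  | nil => simp [PySem.List.enumerate_nil]
  | cons x xs ih =>
    rw [PySem.List.enumerate_cons]
    simp only [List.flatMap_cons, List.count_append]
    rw [ih (s + 1) (by omega)]
    have : (x.map (fun w => (s, pvStartsUpper w))).count (i, b) = 0 := by
      apply List.count_eq_zero_of_not_mem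
      intro hm
      rcases List.mem_map.mp hm with ⟨w, _, hw⟩
      have : s = i := congrArg Prod.fst hw
      omega
    omega

-- the flat tally stream counts exactly the words of sublist k whose flag is b
lemma flags_count (L : List (List String)) (s : Int) (k : Nat) (hk : k < L.length) (b : Bool) :
    ((PySem.List.enumerate L s).flatMap
      (fun p => p.2.map (fun w => (p.1, pvStartsUpper w)))).count (s + (k : Int), b)
    = L[k].countP (fun w => pvStartsUpper w == b) := by
  induction L generalizing s k with
  | nil => simp at hk
  | cons x xs ih =>
    rw [PySem.List.enumerate_cons]
    simp only [List.flatMap_cons, List.count_append]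
    cases k with
    | zero =>
      simp only [Nat.cast_zero, add_zero, List.getElem_cons_zero]
      rw [flags_count_lt xs (s + 1) s b (by omega)]
      simpa using count_map_flags x s b
    | succ m =>
      have hm : m < xs.length := by simpa using hk
      have h0 : (x.map (fun w => (s, pvStartsUpper w))).count (s + ((m + 1 : Nat) : Int), b) = 0 := by
        apply List.count_eq_zero_of_not_mem
        intro hmem
        rcases List.mem_map.mp hmem with ⟨w, _, hw⟩
        have : s = s + ((m + 1 : Nat) : Int) := congrArg Prod.fst hw
        omega
      have := ih (s + 1) m hm
      rw [h0]
      simp only [Nat.zero_add]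
      have harr : s + ((m + 1 : Nat) : Int) = (s + 1) + (m : Int) := by push_cast; ring
      rw [harr, this]
      simp

-- ===== VERDICT (by name: the statement is the Claim_ definition above) =====
theorem count_letter_case_spec : Claim_equal_count_letter_case := by
  intro L _
  unfold Spec_count_letter_case count_letter_case count_letter_case_alt
  rw [PySem.List.foldl_pyRange_zero_pyGetD' L ([] : List String)
        (fun letter_cases v => letter_cases ++ [pvCountsOf v]) []]
  rw [PySem.List.foldl_append_singleton_eq_map]
  apply List.ext_getElem
  · simp [PySem.List.length_pyRange_one]
  · intro n h1 h2
    have hn : n < L.length := by simpa using h1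
    simp only [List.nil_append, List.getElem_map, PySem.List.getElem_pyRange_one]
    -- A side element
    unfold pvCountsOf
    rw [PySem.List.foldl_pyRange_zero_pyGetD' L[n] ""
          (fun (p : Int × Int) w =>
            if pvStartsUpper w then (p.1, p.2 + 1) else (p.1 + 1, p.2)) (0, 0)]
    rw [inner_fold_counts]
    -- B side element
    rw [PySem.Dict.getD_foldl_insert_add_one, PySem.Dict.getD_foldl_insert_add_one]
    simp only [PySem.Dict.getD_empty, zero_add]
    unfold pvFlags
    have hf := flags_count L 0 n hn false
    have ht := flags_count L 0 n hn true
    simp only [zero_add] at hf ht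
    rw [hf, ht]
    have e1 : L[n].countP (fun w => ! pvStartsUpper w)
        = L[n].countP (fun w => pvStartsUpper w == false) := by
      apply List.countP_congr; intro w _; cases pvStartsUpper w <;> simp
    have e2 : L[n].countP pvStartsUpper
        = L[n].countP (fun w => pvStartsUpper w == true) := by
      apply List.countP_congr; intro w _; cases pvStartsUpper w <;> simp
    simp [e1, e2]
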